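-- pv_equiv track=rewrite | github.com/dmalone23/nutv-does-proj-euler | Timmy/p50/main.py | getPrimeSumsUnder
-- ===== SOURCE A (Python) =====
-- def getPrimeSumsUnder(max):
--     primeSums = {}
--     last_prime = 0
--     for i in range(2, max):
--         prime = True
--         for p in primeSums.keys():
--             if i % p == 0:
--                 prime = False
--                 break
--         if prime:
--             primeSums[i] = {1: i}
--             if last_prime > 0:
--                 for k in primeSums[last_prime].keys():
--                     primeSums[i][k+1] = primeSums[last_prime][k] + i
--             last_prime = i
--     return primeSums
-- ===== SOURCE B (Python) =====
-- def getPrimeSumsUnder(max):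
--     # primes below max, by trial division against the primes found so far
--     primes = []
--     for i in range(2, max):
--         if all(i % p != 0 for p in primes):
--             primes.append(i)
--     # prefix sums: S[m] = sum of the first m primes
--     S = [0]
--     acc = 0
--     for p in primes:
--         acc += p
--         S.append(acc)
--     # table by differencing the prefix sums
--     out = {}
--     for n, p in enumerate(primes, 1):
--         out[p] = {k: S[n] - S[n - k] for k in range(1, n + 1)}
--     return out
-- ===== Notes on version B (the rewrite author's own statement) =====
-- stated objective: alternative
-- what changed: B first materialises the increasing prime list and a prefix-sum array S, then builds each prime's table by differencing S (k -> S[n]-S[n-k]), instead of A's chaining where each new prime's dict is derived entry-by-entry from the previous prime's dict.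
import Mathlib
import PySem

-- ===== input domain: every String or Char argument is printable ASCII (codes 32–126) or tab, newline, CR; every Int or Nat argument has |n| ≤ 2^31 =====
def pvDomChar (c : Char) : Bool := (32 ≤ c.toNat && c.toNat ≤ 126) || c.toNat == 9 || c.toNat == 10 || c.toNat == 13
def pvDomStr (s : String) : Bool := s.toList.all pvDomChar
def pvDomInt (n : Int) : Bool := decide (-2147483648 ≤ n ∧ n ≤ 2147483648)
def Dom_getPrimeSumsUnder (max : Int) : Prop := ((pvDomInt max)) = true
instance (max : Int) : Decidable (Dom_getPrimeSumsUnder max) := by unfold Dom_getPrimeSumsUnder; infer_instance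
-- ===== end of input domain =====

-- B builds the table from a prime list and a prefix-sum array (differencing) instead of A's
-- prime-to-prime dict chaining; same values, alternative structure (objective: alternative).

-- ===== PORT A =====
-- one iteration of A's outer loop, state = (primeSums, last_prime)
def aStep (st : PySem.Dict Int (PySem.Dict Int Int) × Int) (i : Int) :
    PySem.Dict Int (PySem.Dict Int Int) × Int :=
  let primeSums := st.1
  let last_prime := st.2
  -- 'for p in primeSums.keys(): if i % p == 0: prime = False; break'
  let prime := primeSums.keys.all (fun p => PySem.Int.mod i p != 0)
  if prime then
    -- primeSums[i] = {1: i}; then extend it from primeSums[last_prime]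
    let inner0 : PySem.Dict Int Int := PySem.Dict.insert PySem.Dict.empty 1 i
    let inner :=
      if last_prime > 0 then
        (PySem.Dict.getD primeSums last_prime PySem.Dict.empty).keys.foldl
          (fun (inn : PySem.Dict Int Int) k =>
            inn.insert (k + 1)
              ((PySem.Dict.getD primeSums last_prime PySem.Dict.empty).getD k 0 + i)) inner0
      else inner0
    (primeSums.insert i inner, i)
  else st

def getPrimeSumsUnder (max : Int) : List (Int × List (Int × Int)) :=
  let st := (PySem.List.pyRange 2 max 1).foldl aStep (PySem.Dict.empty, 0)
  st.1.items.map (fun p => (p.1, p.2.items))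

-- ===== PORT B =====
-- primes below max by trial division against the primes found so far
def bPrimes (max : Int) : List Int :=
  (PySem.List.pyRange 2 max 1).foldl
    (fun ps i => if ps.all (fun p => PySem.Int.mod i p != 0) then ps ++ [i] else ps) []

-- prefix sums: S = [0]; acc = 0; for p in primes: acc += p; S.append(acc)
def bPrefix (primes : List Int) : List Int :=
  (primes.foldl (fun (sa : List Int × Int) p => (sa.1 ++ [sa.2 + p], sa.2 + p)) ([0], 0)).1

def getPrimeSumsUnder_alt (max : Int) : List (Int × List (Int × Int)) :=
  let primes := bPrimes max
  let S := bPrefix primes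
  let out := (PySem.List.enumerate primes 1).foldl
    (fun (d : PySem.Dict Int (PySem.Dict Int Int)) np =>
      d.insert np.2
        ((PySem.List.pyRange 1 (np.1 + 1) 1).foldl
          (fun (e : PySem.Dict Int Int) k =>
            e.insert k ((PySem.List.pyGet? S np.1).getD 0 - (PySem.List.pyGet? S (np.1 - k)).getD 0))
          PySem.Dict.empty))
    PySem.Dict.empty
  out.items.map (fun p => (p.1, p.2.items))

-- ===== PRECONDITION & SPEC =====
def Spec_getPrimeSumsUnder (max : Int) (out : List (Int × List (Int × Int))) : Prop := out = getPrimeSumsUnder_alt max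
instance (max : Int) (out : List (Int × List (Int × Int))) : Decidable (Spec_getPrimeSumsUnder max out) := by unfold Spec_getPrimeSumsUnder; infer_instance

-- ===== CLAIM (what is proved, stated in full; the proofs are below) =====
def Claim_equal_getPrimeSumsUnder : Prop := ∀ (max : Int), Dom_getPrimeSumsUnder max → Spec_getPrimeSumsUnder max (getPrimeSumsUnder max)

-- ===== LEMMAS AND PROOFS =====

-- inner table for a new prime p, derived from the previous prime's inner table (A's chaining rule)
def chainInner (prev : List (Int × Int)) (p : Int) : List (Int × Int) :=
  (1, p) :: prev.map (fun kv => (kv.1 + 1, kv.2 + p))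

-- the whole table built by chaining, carrying the previous inner table
def build2 : List Int → List (Int × Int) → List (Int × List (Int × Int))
  | [], _ => []
  | p :: rest, prev => (p, chainInner prev p) :: build2 rest (chainInner prev p)

def prevOf (ps : List Int) : List (Int × Int) := ps.foldl chainInner []

def table (ps : List Int) : List (Int × List (Int × Int)) := build2 ps []

def mkD (ps : List Int) : PySem.Dict Int (PySem.Dict Int Int) :=
  PySem.Dict.mk ((table ps).map (fun e => (e.1, PySem.Dict.mk e.2)))

def lastOf (ps : List Int) : Int := ps.getLastD 0

def keysOf : Nat → List Int
  | 0 => []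
  | n + 1 => 1 :: (keysOf n).map (· + 1)

def bStep (ps : List Int) (i : Int) : List Int :=
  if ps.all (fun p => PySem.Int.mod i p != 0) then ps ++ [i] else ps

theorem fst_build2 (ps : List Int) (prev : List (Int × Int)) :
    (build2 ps prev).map Prod.fst = ps := by
  induction ps generalizing prev with
  | nil => rfl
  | cons p rest ih => simp [build2, ih]

theorem length_build2 (ps : List Int) (prev : List (Int × Int)) :
    (build2 ps prev).length = ps.length := by
  have := congrArg List.length (fst_build2 ps prev)
  simpa using this

theorem getElem_build2 (ps : List Int) (prev : List (Int × Int)) (j : Nat)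
    (h : j < ps.length) (h' : j < (build2 ps prev).length) :
    (build2 ps prev)[j] = (ps[j], (ps.take (j + 1)).foldl chainInner prev) := by
  induction ps generalizing prev j with
  | nil => simp at h
  | cons p rest ih =>
    cases j with
    | zero => simp [build2, List.take, List.foldl]
    | succ j =>
      have hj : j < rest.length := by simpa using h
      have hj' : j < (build2 rest (chainInner prev p)).length := by
        rw [length_build2]; exact hj
      simp only [build2, List.getElem_cons_succ, List.take_succ_cons, List.foldl_cons]
      exact ih (chainInner prev p) j hj hj'

theorem build2_append (ps : List Int) (q : Int) (prev : List (Int × Int)) :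
    build2 (ps ++ [q]) prev = build2 ps prev ++ [(q, chainInner (ps.foldl chainInner prev) q)] := by
  induction ps generalizing prev with
  | nil => simp [build2]
  | cons p rest ih => simp [build2, ih, List.foldl_cons]

theorem prevOf_append (ps : List Int) (q : Int) :
    prevOf (ps ++ [q]) = chainInner (prevOf ps) q := by
  simp [prevOf, List.foldl_append]

theorem table_append (ps : List Int) (q : Int) :
    table (ps ++ [q]) = table ps ++ [(q, chainInner (prevOf ps) q)] := by
  simpa [table, prevOf] using build2_append ps q []

theorem fst_chainInner (prev : List (Int × Int)) (p : Int) :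
    (chainInner prev p).map Prod.fst = 1 :: ((prev.map Prod.fst).map (· + 1)) := by
  simp [chainInner, List.map_map, Function.comp_def]

theorem keysOf_succ (n : Nat) : keysOf (n + 1) = 1 :: ((keysOf n).map (· + 1)) := rfl

theorem fst_prevOf (ps : List Int) : (prevOf ps).map Prod.fst = keysOf ps.length := by
  induction ps using List.reverseRecOn with
  | nil => rfl
  | append_singleton qs q ih =>
    rw [prevOf_append, fst_chainInner, ih]
    simp [keysOf_succ]

theorem one_le_of_mem_keysOf {n : Nat} {x : Int} (h : x ∈ keysOf n) : 1 ≤ x := by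
  induction n generalizing x with
  | zero => simp [keysOf] at h
  | succ n ih =>
    rw [keysOf_succ] at h
    rcases List.mem_cons.mp h with rfl | hm
    · omega
    · obtain ⟨a, ha, rfl⟩ := List.mem_map.mp hm
      have := ih ha
      omega

theorem nodup_keysOf (n : Nat) : (keysOf n).Nodup := by
  induction n with
  | zero => simp [keysOf]
  | succ n ih =>
    rw [keysOf_succ]
    refine List.Nodup.cons ?_ (ih.map (fun a b hab => by omega))
    intro hmem
    obtain ⟨a, ha, hae⟩ := List.mem_map.mp hmem
    have := one_le_of_mem_keysOf ha
    omega

theorem prevOf_closed (ps : List Int) :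
    prevOf ps = (List.range ps.length).map
      (fun (t : Nat) => (((t : Int) + 1), ((ps.drop (ps.length - (t + 1))).sum : Int))) := by
  induction ps using List.reverseRecOn with
  | nil => rfl
  | append_singleton qs q ih =>
    rw [prevOf_append, ih]
    simp only [chainInner, List.length_append, List.length_singleton,
      List.range_succ_eq_map, List.map_cons, List.map_map]
    congr 1
    · have hd : (qs ++ [q]).drop qs.length = [q] := by
        simpa using List.drop_left qs [q]
      simp [hd]
    · apply List.map_congr_left
      intro t ht
      simp only [List.mem_range] at ht
      simp only [Function.comp_apply]
      have hidx : qs.length + 1 - (t + 1 + 1) = qs.length - (t + 1) := by omega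
      have hle : qs.length - (t + 1) ≤ qs.length := by omega
      have hdrop : (qs ++ [q]).drop (qs.length - (t + 1))
          = qs.drop (qs.length - (t + 1)) ++ [q] := by
        rw [List.drop_append_of_le_length hle]
      rw [hidx, hdrop]
      simp [List.sum_append]

theorem keys_mkD (ps : List Int) : (mkD ps).keys = ps := by
  unfold mkD table
  simp only [PySem.Dict.keys, PySem.Dict.items, List.map_map, Function.comp_def]
  simpa [Function.comp_def] using fst_build2 ps []

theorem lastOf_mem_mkD (ps : List Int) (h : ps ≠ []) :
    (lastOf ps, PySem.Dict.mk (prevOf ps)) ∈ (mkD ps).items := by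
  rcases List.eq_nil_or_concat ps with rfl | ⟨qs, q, rfl⟩
  · exact absurd rfl h
  · simp only [List.concat_eq_append]
    rw [prevOf_append]
    simp [mkD, table_append, lastOf]

theorem lastOf_concat (qs : List Int) (q : Int) : lastOf (qs ++ [q]) = q := by
  simp [lastOf]

theorem lastOf_mem (ps : List Int) (h : ps ≠ []) : lastOf ps ∈ ps := by
  rcases List.eq_nil_or_concat ps with rfl | ⟨qs, q, rfl⟩
  · exact absurd rfl h
  · simp only [List.concat_eq_append, lastOf_concat]
    simp

theorem aStep_eq (ps : List Int) (i : Int) (_hi : 2 ≤ i)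
    (hmem : ∀ x ∈ ps, 2 ≤ x ∧ x < i) (hnd : ps.Nodup) :
    aStep (mkD ps, lastOf ps) i = (mkD (bStep ps i), lastOf (bStep ps i)) := by
  have hkeys := keys_mkD ps
  have hndk : (mkD ps).keys.Nodup := by rw [hkeys]; exact hnd
  unfold aStep bStep
  simp only [hkeys]
  by_cases hall : (ps.all (fun p => PySem.Int.mod i p != 0)) = true
  · simp only [hall, if_true]
    have hni : i ∉ ps := fun hm => absurd (hmem i hm).2 (lt_irrefl i)
    have hcont : (mkD ps).contains i = false := by
      rw [PySem.Dict.contains_eq_decide_mem_keys, hkeys]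
      simp [hni]
    rw [lastOf_concat]
    have hinner : (if lastOf ps > 0 then
        (PySem.Dict.getD (mkD ps) (lastOf ps) PySem.Dict.empty).keys.foldl
          (fun (inn : PySem.Dict Int Int) k =>
            inn.insert (k + 1)
              ((PySem.Dict.getD (mkD ps) (lastOf ps) PySem.Dict.empty).getD k 0 + i))
          (PySem.Dict.insert PySem.Dict.empty 1 i)
      else PySem.Dict.insert PySem.Dict.empty 1 i)
        = PySem.Dict.mk (chainInner (prevOf ps) i) := by
      rcases List.eq_nil_or_concat ps with rfl | ⟨qs, q, hps⟩
      · rw [if_neg (by simp [lastOf])]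
        apply PySem.Dict.ext
        rw [PySem.Dict.items_insert_of_not_contains _ _ (PySem.Dict.contains_empty _)]
        simp [chainInner, prevOf, PySem.Dict.empty]
      · have hne : ps ≠ [] := by rw [hps]; simp
        have hlm : lastOf ps ∈ ps := lastOf_mem ps hne
        have hlpos : lastOf ps > 0 := by have := (hmem _ hlm).1; omega
        rw [if_pos hlpos]
        have hget : PySem.Dict.getD (mkD ps) (lastOf ps) PySem.Dict.empty
            = PySem.Dict.mk (prevOf ps) :=
          PySem.Dict.getD_of_mem_items _ (lastOf_mem_mkD ps hne) hndk _
        rw [hget]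
        have hk2 : (PySem.Dict.mk (prevOf ps)).keys = keysOf ps.length := by
          simp only [PySem.Dict.keys]
          exact fst_prevOf ps
        have hndk2 : (PySem.Dict.mk (prevOf ps)).keys.Nodup := by
          rw [hk2]; exact nodup_keysOf ps.length
        rw [hk2]
        apply PySem.Dict.ext
        rw [PySem.Dict.items_foldl_insert_fresh _ _ _ _
          (by
            intro a ha
            have h1 := one_le_of_mem_keysOf ha
            simp only [PySem.Dict.contains_insert, PySem.Dict.contains_empty, Bool.or_false]
            simpa using by omega)
          ((nodup_keysOf ps.length).map (fun a b hab => by omega))]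
        rw [PySem.Dict.items_insert_of_not_contains _ _ (PySem.Dict.contains_empty _)]
        have hitems : (PySem.Dict.mk (prevOf ps)).items = prevOf ps := rfl
        have hmapkeys := PySem.Dict.items_eq_map_keys (PySem.Dict.mk (prevOf ps)) hndk2 (0 : Int)
        rw [hitems, hk2] at hmapkeys
        simp only [chainInner]
        conv_rhs => rw [hmapkeys]
        simp [List.map_map, PySem.Dict.empty, Function.comp_def]
    rw [hinner]
    refine Prod.ext ?_ rfl
    apply PySem.Dict.ext
    rw [PySem.Dict.items_insert_of_not_contains _ _ hcont]
    simp [mkD, table_append]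
  · simp [hall]

theorem mainA (max : Int) :
    (PySem.List.pyRange 2 max 1).foldl aStep (PySem.Dict.empty, 0)
        = (mkD (bPrimes max), lastOf (bPrimes max))
      ∧ (∀ x ∈ bPrimes max, 2 ≤ x ∧ x < max) ∧ (bPrimes max).Nodup := by
  by_cases h2 : max ≤ 2
  · rw [PySem.List.pyRange_one_eq_nil h2]
    unfold bPrimes
    rw [PySem.List.pyRange_one_eq_nil h2]
    exact ⟨rfl, by simp, by simp⟩
  · have hmax : 2 ≤ max := by omega
    clear h2
    induction max, hmax using Int.le_induction with
    | base =>
      rw [PySem.List.pyRange_one_eq_nil (by omega)]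
      unfold bPrimes
      rw [PySem.List.pyRange_one_eq_nil (by omega)]
      exact ⟨rfl, by simp, by simp⟩
    | succ n hn ih =>
      obtain ⟨ihA, ihmem, ihnd⟩ := ih
      have hrange : PySem.List.pyRange 2 (n + 1) 1 = PySem.List.pyRange 2 n 1 ++ [n] :=
        PySem.List.pyRange_one_succ_right (by omega)
      have hb : bPrimes (n + 1) = bStep (bPrimes n) n := by
        unfold bPrimes bStep
        rw [hrange, List.foldl_append]
        rfl
      have hstep := aStep_eq (bPrimes n) n hn ihmem ihnd
      refine ⟨?_, ?_, ?_⟩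
      · rw [hrange, List.foldl_append, ihA]
        simpa [hb] using hstep
      · intro x hx
        rw [hb] at hx
        unfold bStep at hx
        by_cases hall : ((bPrimes n).all (fun p => PySem.Int.mod n p != 0)) = true
        · simp only [hall, if_true, List.mem_append, List.mem_singleton] at hx
          rcases hx with hx | rfl
          · have := ihmem x hx; omega
          · omega
        · rw [Bool.not_eq_true] at hall
          simp only [hall, Bool.false_eq_true, if_false] at hx
          have := ihmem x hx
          omega
      · rw [hb]
        unfold bStep
        by_cases hall : ((bPrimes n).all (fun p => PySem.Int.mod n p != 0)) = true
        · simp only [hall, if_true]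
          refine List.Nodup.append ihnd (by simp) ?_
          intro a ha hb'
          simp only [List.mem_singleton] at hb'
          subst hb'
          have := ihmem a ha
          omega
        · rw [Bool.not_eq_true] at hall
          simpa [hall] using ihnd

theorem bPrefix_fold (ps : List Int) (l : List Int) (a : Int) :
    ps.foldl (fun (sa : List Int × Int) p => (sa.1 ++ [sa.2 + p], sa.2 + p)) (l, a)
      = (l ++ (List.range ps.length).map (fun m => a + (ps.take (m + 1)).sum), a + ps.sum) := by
  induction ps generalizing l a with
  | nil => simp
  | cons p rest ih =>
    simp only [List.foldl_cons]
    rw [ih]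
    refine Prod.ext ?_ (by simp [List.sum_cons]; ring)
    simp only [List.length_cons, List.range_succ_eq_map, List.map_cons, List.map_map,
      List.take_succ_cons, List.sum_cons, List.append_assoc]
    congr 1
    simp only [List.take_zero, List.sum_nil, add_zero, List.singleton_append]
    congr 1
    apply List.map_congr_left
    intro m _
    simp only [Function.comp_apply]
    ring

theorem bPrefix_closed (ps : List Int) :
    bPrefix ps = (List.range (ps.length + 1)).map (fun m => ((ps.take m).sum : Int)) := by
  unfold bPrefix
  rw [bPrefix_fold]
  simp only [List.range_succ_eq_map, List.map_cons, List.map_map]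
  simp only [List.take_zero, List.sum_nil, zero_add]
  rfl

theorem items_empty {κ ν : Type} [BEq κ] : (PySem.Dict.empty : PySem.Dict κ ν).items = [] := rfl

theorem inner_eq (ps : List Int) (j : Nat) (hj : j < ps.length) :
    (PySem.List.pyRange 1 ((1 + (j : Int)) + 1) 1).map
      (fun k => (k, (PySem.List.pyGet? (bPrefix ps) (1 + (j : Int))).getD 0
                  - (PySem.List.pyGet? (bPrefix ps) (1 + (j : Int) - k)).getD 0))
      = prevOf (ps.take (j + 1)) := by
  rw [prevOf_closed]
  have hlen : (ps.take (j + 1)).length = j + 1 := by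
    rw [List.length_take]
    omega
  rw [hlen]
  have hrange : PySem.List.pyRange 1 ((1 + (j : Int)) + 1) 1
      = (List.range (j + 1)).map (fun (k : Nat) => 1 + (k : Int)) := by
    rw [PySem.List.pyRange_one]
    have h' : ((1 + (j : Int) + 1) - 1).toNat = j + 1 := by omega
    rw [h']
  rw [hrange, List.map_map]
  apply List.map_congr_left
  intro t ht
  simp only [List.mem_range] at ht
  simp only [Function.comp_apply]
  have hS := bPrefix_closed ps
  have hget1 : (PySem.List.pyGet? (bPrefix ps) (1 + (j : Int))).getD 0
      = (ps.take (j + 1)).sum := by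
    have hcast : (1 + (j : Int)) = ((j + 1 : Nat) : Int) := by push_cast; ring
    rw [hS, hcast, PySem.List.pyGet?_natCast]
    rw [List.getElem?_map, List.getElem?_range (by omega)]
    rfl
  have hget2 : (PySem.List.pyGet? (bPrefix ps) (1 + (j : Int) - (1 + (t : Int)))).getD 0
      = (ps.take (j - t)).sum := by
    have hcast : (1 + (j : Int) - (1 + (t : Int))) = ((j - t : Nat) : Int) := by
      push_cast [Nat.cast_sub (by omega : t ≤ j)]
      ring
    rw [hS, hcast, PySem.List.pyGet?_natCast]
    rw [List.getElem?_map, List.getElem?_range (by omega)]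
    rfl
  rw [hget1, hget2]
  have hsplit : (ps.take (j + 1)).sum
      = (ps.take (j - t)).sum + ((ps.take (j + 1)).drop (j + 1 - (t + 1))).sum := by
    have h1 : j + 1 - (t + 1) = j - t := by omega
    have h2 : (ps.take (j + 1)).take (j - t) = ps.take (j - t) := by
      rw [List.take_take]
      congr 1
      omega
    calc (ps.take (j + 1)).sum
        = ((ps.take (j + 1)).take (j - t) ++ (ps.take (j + 1)).drop (j - t)).sum := by
          rw [List.take_append_drop]
      _ = (ps.take (j - t)).sum + ((ps.take (j + 1)).drop (j + 1 - (t + 1))).sum := by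
          rw [List.sum_append, h2, h1]
  refine Prod.ext (by ring) ?_
  omega

theorem mainB (ps : List Int) (hnd : ps.Nodup) :
    ((PySem.List.enumerate ps 1).foldl
      (fun (d : PySem.Dict Int (PySem.Dict Int Int)) np =>
        d.insert np.2
          ((PySem.List.pyRange 1 (np.1 + 1) 1).foldl
            (fun (e : PySem.Dict Int Int) k =>
              e.insert k ((PySem.List.pyGet? (bPrefix ps) np.1).getD 0
                - (PySem.List.pyGet? (bPrefix ps) (np.1 - k)).getD 0))
            PySem.Dict.empty))
      PySem.Dict.empty).items.map (fun p => (p.1, p.2.items)) = table ps := by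
  rw [PySem.Dict.items_foldl_insert_fresh (PySem.List.enumerate ps 1) (fun np => np.2) _
    PySem.Dict.empty (fun a _ => PySem.Dict.contains_empty _)
    (by rw [PySem.List.map_snd_enumerate]; exact hnd)]
  simp only [items_empty, List.nil_append, List.map_map]
  apply List.ext_getElem
  · simp [PySem.List.length_enumerate, table, length_build2]
  · intro j h1 h2
    have hj : j < ps.length := by
      simpa [table, length_build2] using h2
    have hje : j < (PySem.List.enumerate ps 1).length := by
      simpa [PySem.List.length_enumerate] using hj
    simp only [List.getElem_map, Function.comp_apply]
    rw [PySem.List.getElem_enumerate]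
    have ht : (table ps)[j]'h2 = (ps[j]'hj, (ps.take (j + 1)).foldl chainInner []) :=
      getElem_build2 ps [] j hj h2
    rw [ht]
    refine Prod.ext rfl ?_
    rw [PySem.Dict.items_foldl_insert_fresh _ (fun k => k) _
      PySem.Dict.empty (fun a _ => PySem.Dict.contains_empty _)
      (by simpa using PySem.List.nodup_pyRange_one 1 ((1 + (j : Int)) + 1))]
    simp only [items_empty, List.nil_append]
    exact inner_eq ps j hj

-- ===== VERDICT (by name: the statement is the Claim_ definition above) =====
theorem getPrimeSumsUnder_spec : Claim_equal_getPrimeSumsUnder := by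
  intro max _
  unfold Spec_getPrimeSumsUnder getPrimeSumsUnder getPrimeSumsUnder_alt
  rw [(mainA max).1, mainB (bPrimes max) (mainA max).2.2]
  simp [mkD, List.map_map, Function.comp_def]
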